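-- pv_equiv track=rewrite | github.com/SeungHunL/TIL | 2022/algo/이차원 배열과 연ㅅ나.py | equ_r
-- ===== SOURCE A (Python) =====
-- def equ_r(arr):
--     narr = []
--     for line in arr:
--         elements = set(line)
--         if 0 in elements:
--             elements.remove(0)
--         nline = [(element, line.count(element)) for element in sorted(list(elements))]
--         nline.sort(key=lambda x: x[1])
--         line = []
--         for t in nline:
--             line += list(t)
--         narr.append(line)
--     arr_len = max(list(map(len, narr)))
--     for i in range(len(narr)):
--         narr[i] += (arr_len - len(narr[i])) * [0]
--         if len(narr[i]) > 100:
--             narr[i] = narr[i][:100]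
--     return narr
-- ===== SOURCE B (Python) =====
-- def equ_r(arr):
--     rows = []
--     for line in arr:
--         cnt = {}
--         for v in line:
--             if v != 0:
--                 cnt[v] = cnt.get(v, 0) + 1
--         buckets = {}
--         for v in sorted(cnt):
--             buckets.setdefault(cnt[v], []).append(v)
--         row = []
--         for c in sorted(buckets):
--             for v in buckets[c]:
--                 row.append(v)
--                 row.append(c)
--         rows.append(row)
--     width = max(len(r) for r in rows)
--     return [(r + [0] * (width - len(r)))[:100] for r in rows]
-- ===== Notes on version B (the rewrite author's own statement) =====
-- stated objective: faster
-- what changed: Per row, A repeatedly calls line.count for every distinct value and then stable-sorts the (value,count) pair list by count; B counts all nonzero values in one dict pass and groups values into a count->values bucket dict, emitting buckets in ascending count order (values ascending inside each bucket), so neither the repeated counting scans nor the pair-list sort are performed.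
-- outside the precondition, e.g. on equ_r([]): A raises ValueError, B raises ValueError
import Mathlib
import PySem

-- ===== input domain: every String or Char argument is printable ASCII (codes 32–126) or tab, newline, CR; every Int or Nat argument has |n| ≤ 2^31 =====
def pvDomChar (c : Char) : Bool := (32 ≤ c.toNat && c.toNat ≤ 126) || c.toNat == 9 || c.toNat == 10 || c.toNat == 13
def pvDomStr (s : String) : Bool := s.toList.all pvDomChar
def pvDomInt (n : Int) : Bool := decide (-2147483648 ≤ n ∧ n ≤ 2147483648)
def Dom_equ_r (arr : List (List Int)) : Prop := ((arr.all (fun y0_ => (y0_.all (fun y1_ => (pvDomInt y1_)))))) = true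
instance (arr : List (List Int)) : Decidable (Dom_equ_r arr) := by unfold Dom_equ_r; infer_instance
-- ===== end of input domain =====

-- B replaces A's per-row "sort distinct values, pair with counts, stable-sort pairs by count" with a
-- counting dict plus a count→values bucket dict traversed in ascending count/value order (objective: alternative).

-- ===== PORT A =====
-- per-row body of A's main loop
def equ_r_rowA (line : List Int) : List Int :=
  let elements := PySem.Set.ofList line
  -- Python: 'if 0 in elements: elements.remove(0)' — remove under a membership guard is exactly discard
  let elements := if PySem.Set.contains elements 0 then PySem.Set.discard elements 0 else elements
  let nline := (PySem.List.sorted elements (fun v => v) false).map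
      (fun element => (element, (PySem.List.count line element : Int)))
  let nline := PySem.List.sorted nline (fun x => x.2) false
  nline.foldl (fun acc t => acc ++ [t.1, t.2]) []

def equ_r (arr : List (List Int)) : List (List Int) :=
  let narr := arr.foldl (fun acc line => acc ++ [equ_r_rowA line]) []
  match PySem.List.max? (narr.map (fun r => (r.length : Int))) (fun x => x) with
  | none => []   -- Python raises ValueError here (arr = []); excluded by Pre_equ_r
  | some arrLen =>
    -- 'for i in range(len(narr)): narr[i] += …; if len(narr[i]) > 100: narr[i] = narr[i][:100]'
    -- each iteration rewrites exactly narr[i], so the indexed in-place loop is a map over narr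
    narr.map (fun row =>
      let row := row ++ PySem.List.pyRepeat [0] (arrLen - (row.length : Int))
      if 100 < row.length then PySem.List.slice row none (some 100) else row)

-- ===== PORT B =====
-- per-row body of B's main loop
def equ_r_rowB (line : List Int) : List Int :=
  let cnt : PySem.Dict Int Int :=
    line.foldl (fun d v => if v ≠ 0 then d.modify v 0 (fun x => x + 1) else d) PySem.Dict.empty
  -- 'buckets.setdefault(cnt[v], []).append(v)' appends v to the list stored under key cnt[v]
  let buckets : PySem.Dict Int (List Int) :=
    (PySem.List.sorted cnt.keys (fun v => v) false).foldl
      (fun d v => d.modify (cnt.getD v 0) [] (fun l => l ++ [v])) PySem.Dict.empty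
  (PySem.List.sorted buckets.keys (fun c => c) false).foldl
    (fun row c => (buckets.getD c []).foldl (fun row v => row ++ [v] ++ [c]) row) []

def equ_r_alt (arr : List (List Int)) : List (List Int) :=
  let rows := arr.foldl (fun acc line => acc ++ [equ_r_rowB line]) []
  match PySem.List.max? (rows.map (fun r => (r.length : Int))) (fun x => x) with
  | none => []   -- Python raises ValueError here (arr = []); excluded by Pre_equ_r
  | some width =>
    rows.map (fun r =>
      PySem.List.slice (r ++ PySem.List.pyRepeat [0] (width - (r.length : Int))) none (some 100))

-- ===== PRECONDITION & SPEC =====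
-- Pre_ excludes only arr = [], on which Python A (and B as well) raises ValueError in max() of an empty sequence.
def Pre_equ_r (arr : List (List Int)) : Prop := arr ≠ []
instance (arr : List (List Int)) : Decidable (Pre_equ_r arr) := by unfold Pre_equ_r; infer_instance
def pvWitness_equ_r : List (List Int) := [[1, 1, 2, 0]]

def Spec_equ_r (arr : List (List Int)) (out : List (List Int)) : Prop := out = equ_r_alt arr
instance (arr : List (List Int)) (out : List (List Int)) : Decidable (Spec_equ_r arr out) := by
  unfold Spec_equ_r; infer_instance

-- ===== CLAIM (what is proved, stated in full; the proofs are below) =====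
def Claim_equal_equ_r : Prop := ∀ (arr : List (List Int)), Dom_equ_r arr → Pre_equ_r arr → Spec_equ_r arr (equ_r arr)

-- ===== LEMMAS AND PROOFS =====

-- strict / tie-tolerant count-then-value lexicographic orders on (value, count) pairs
def pvLexS (a b : Int × Int) : Prop := a.2 < b.2 ∨ (a.2 = b.2 ∧ a.1 < b.1)
def pvLex (a b : Int × Int) : Prop := a.2 < b.2 ∨ (a.2 = b.2 ∧ a.1 ≤ b.1)

lemma pv_insertBy_pairwise (x : Int × Int) (acc : List (Int × Int))
    (hacc : acc.Pairwise pvLexS) (hx : ∀ a ∈ acc, a.1 < x.1) :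
    (PySem.List.insertBy (fun a b => decide (a.2 < b.2)) x acc).Pairwise pvLexS := by
  induction acc with
  | nil => simp [PySem.List.insertBy]
  | cons y ys ih =>
    rcases hacc with _ | ⟨hy, hys⟩
    by_cases h : x.2 < y.2
    · rw [show PySem.List.insertBy (fun a b => decide (a.2 < b.2)) x (y :: ys)
          = x :: y :: ys by simp [PySem.List.insertBy, h]]
      constructor
      · intro b hb
        rcases List.mem_cons.1 hb with rfl | hb
        · exact Or.inl h
        · rcases hy b hb with h2 | ⟨h2, _⟩ <;> exact Or.inl (by omega)
      · exact List.Pairwise.cons hy hys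
    · rw [show PySem.List.insertBy (fun a b => decide (a.2 < b.2)) x (y :: ys)
          = y :: PySem.List.insertBy (fun a b => decide (a.2 < b.2)) x ys by
            simp [PySem.List.insertBy, h]]
      constructor
      · intro b hb
        rcases (PySem.List.mem_insertBy _ _ _ _).1 hb with rfl | hb
        · have := hx y (by simp)
          unfold pvLexS; omega
        · exact hy b hb
      · exact ih hys (fun a ha => hx a (by simp [ha]))

lemma pv_foldl_insertBy_pairwise (l : List (Int × Int)) (acc : List (Int × Int))
    (hacc : acc.Pairwise pvLexS) (hl : l.Pairwise (fun a b => a.1 < b.1))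
    (hcross : ∀ a ∈ acc, ∀ b ∈ l, a.1 < b.1) :
    (l.foldl (fun acc x => PySem.List.insertBy (fun a b => decide (a.2 < b.2)) x acc) acc).Pairwise pvLexS := by
  induction l generalizing acc with
  | nil => simpa using hacc
  | cons x xs ih =>
    rcases hl with _ | ⟨hx, hxs⟩
    simp only [List.foldl_cons]
    apply ih
    · exact pv_insertBy_pairwise x acc hacc (fun a ha => hcross a ha x (by simp))
    · exact hxs
    · intro a ha b hb
      rcases (PySem.List.mem_insertBy _ _ _ _).1 ha with rfl | ha
      · exact hx b hb
      · exact hcross a ha b (by simp [hb])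

lemma pv_sorted_snd_pairwise (xs : List (Int × Int)) (h : xs.Pairwise (fun a b => a.1 < b.1)) :
    (PySem.List.sorted xs (fun p => p.2) false).Pairwise pvLexS := by
  rw [PySem.List.sorted_eq_foldl_insertBy]
  exact pv_foldl_insertBy_pairwise xs [] (by simp) h (by simp)

lemma pv_flatMap_filter_perm (g : Int → Int) (ks : List Int) (vals : List Int)
    (hnd : ks.Nodup) (hcov : ∀ v ∈ vals, g v ∈ ks) :
    (ks.flatMap (fun c => vals.filter (fun v => g v == c))).Perm vals := by
  induction ks generalizing vals with
  | nil =>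
    have : vals = [] := by
      cases vals with
      | nil => rfl
      | cons v vs => exact absurd (hcov v (by simp)) (by simp)
    simp [this]
  | cons c ks ih =>
    rcases List.nodup_cons.1 hnd with ⟨hc, hnd'⟩
    simp only [List.flatMap_cons]
    have hcongr : ∀ c' ∈ ks, vals.filter (fun v => g v == c')
        = (vals.filter (fun v => !(g v == c))).filter (fun v => g v == c') := by
      intro c' hc'
      rw [List.filter_filter]
      apply List.filter_congr
      intro v _
      by_cases h : g v = c'
      · have hne : g v ≠ c := fun hh => hc ((h.symm.trans hh) ▸ hc')
        simp only [h, beq_self_eq_true, Bool.true_and]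
        have : (c' == c) = false := by simpa using fun hcc => hne (h.trans hcc)
        simp [this]
      · simp [h]
    have h1 : ks.flatMap (fun c' => vals.filter (fun v => g v == c'))
        = ks.flatMap (fun c' => (vals.filter (fun v => !(g v == c))).filter (fun v => g v == c')) :=
      List.flatMap_congr hcongr
    have h2 := ih (vals.filter (fun v => !(g v == c))) hnd' (by
      intro v hv
      rcases List.mem_filter.1 hv with ⟨hv1, hv2⟩
      rcases List.mem_cons.1 (hcov v hv1) with h3 | h3
      · exact absurd h3 (by simpa using hv2)
      · exact h3)
    rw [h1]
    exact (List.Perm.append_left _ h2).trans (List.filter_append_perm _ vals)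

lemma pv_flatMap_pairwise (F : Int → List (Int × Int)) (ks : List Int)
    (hks : ks.Pairwise (· < ·))
    (hsnd : ∀ c, ∀ p ∈ F c, p.2 = c)
    (hfst : ∀ c, (F c).Pairwise (fun a b => a.1 < b.1)) :
    (ks.flatMap F).Pairwise pvLex := by
  induction ks with
  | nil => simp
  | cons c ks ih =>
    rcases hks with _ | ⟨hc, hks'⟩
    simp only [List.flatMap_cons]
    rw [List.pairwise_append]
    refine ⟨(hfst c).imp_of_mem ?_, ih hks', ?_⟩
    · intro a b ha hb hab
      exact Or.inr ⟨by rw [hsnd c a ha, hsnd c b hb], le_of_lt hab⟩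
    · intro a ha b hb
      rcases List.mem_flatMap.1 hb with ⟨c', hc', hbc'⟩
      exact Or.inl (by rw [hsnd c a ha, hsnd c' b hbc']; exact hc c' hc')

lemma pv_keys_foldl_modify (g : Int → Int) (f : Int → List Int → List Int) (l : List Int)
    (d : PySem.Dict Int (List Int)) :
    (l.foldl (fun d v => d.modify (g v) [] (f v)) d).keys = PySem.Set.update d.keys (l.map g) := by
  induction l generalizing d with
  | nil => simp [PySem.Set.update]
  | cons v l ih =>
    simp only [List.foldl_cons, List.map_cons, PySem.Set.update_cons]
    rw [ih]
    congr 1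
    rw [PySem.Dict.keys_modify]
    by_cases h : PySem.Dict.contains d (g v)
    · rw [PySem.Dict.keys_insert_of_contains _ _ h,
        PySem.Set.add_of_mem ((PySem.Dict.contains_iff_mem_keys _ _).1 h)]
    · rw [PySem.Dict.keys_insert_of_not_contains _ _ (by simpa using h),
        PySem.Set.add_of_not_mem (fun hm => h ((PySem.Dict.contains_iff_mem_keys _ _).2 hm))]

-- intermediate objects of B's row computation, named for the proofs
def pvCnt (line : List Int) : PySem.Dict Int Int :=
  line.foldl (fun d v => if v ≠ 0 then d.modify v 0 (fun x => x + 1) else d) PySem.Dict.empty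
def pvG (line : List Int) (v : Int) : Int := (pvCnt line).getD v 0
def pvVals (line : List Int) : List Int := PySem.List.sorted (pvCnt line).keys (fun v => v) false
def pvBuckets (line : List Int) : PySem.Dict Int (List Int) :=
  (pvVals line).foldl (fun d v => d.modify (pvG line v) [] (fun l => l ++ [v])) PySem.Dict.empty

lemma pv_cnt_eq (line : List Int) :
    pvCnt line = (line.filter (fun v => v ≠ 0)).foldl
      (fun d v => d.modify v 0 (fun x => x + 1)) PySem.Dict.empty := by
  unfold pvCnt
  rw [List.foldl_filter]
  congr 1
  funext d v
  by_cases h : v = 0 <;> simp [h]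

lemma pv_cnt_keys (line : List Int) :
    (pvCnt line).keys = PySem.Set.ofList (line.filter (fun v => v ≠ 0)) := by
  rw [pv_cnt_eq]
  rw [show (fun (d : PySem.Dict Int Int) v => d.modify v 0 (fun x => x + 1))
      = (fun (d : PySem.Dict Int Int) v => d.modify v 0 ((fun _ _ => (· + 1)) d v)) from rfl,
    PySem.Dict.keys_foldl_modify]
  rw [PySem.Dict.keys_empty, PySem.Set.update_nil_left]

lemma pv_cnt_getD (line : List Int) (v : Int) :
    pvG line v = (List.count v (line.filter (fun v => v ≠ 0)) : Int) := by
  unfold pvG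
  rw [pv_cnt_eq, PySem.Dict.getD_foldl_modify_add_one]
  simp [PySem.Dict.getD, PySem.Dict.get?_empty]

lemma pv_vals_pairwise (line : List Int) : (pvVals line).Pairwise (· < ·) := by
  unfold pvVals
  rw [pv_cnt_keys]
  exact PySem.List.sorted_ofList_pairwise_lt _

lemma pv_vals_mem (line : List Int) (v : Int) :
    v ∈ pvVals line ↔ v ∈ line ∧ v ≠ 0 := by
  unfold pvVals
  rw [PySem.List.mem_sorted, pv_cnt_keys, PySem.Set.mem_ofList]
  simp

lemma pv_g_count (line : List Int) (v : Int) (hv : v ∈ pvVals line) :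
    pvG line v = (List.count v line : Int) := by
  rw [pv_cnt_getD, List.count_filter (by simp [(pv_vals_mem line v).1 hv |>.2])]

lemma pv_buckets_getD (line : List Int) (c : Int) :
    (pvBuckets line).getD c [] = (pvVals line).filter (fun v => pvG line v == c) := by
  unfold pvBuckets
  rw [show ((pvVals line).foldl (fun d v => d.modify (pvG line v) [] (fun l => l ++ [v]))
        PySem.Dict.empty)
      = (((pvVals line).map (fun v => (pvG line v, v))).foldl
          (fun d p => d.modify p.1 [] (fun l => l ++ [p.2])) PySem.Dict.empty) from
      by rw [List.foldl_map],
    PySem.Dict.getD_foldl_modify_append]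
  simp [List.filter_map, Function.comp_def, List.map_map]

lemma pv_buckets_keys (line : List Int) :
    (pvBuckets line).keys = PySem.Set.ofList ((pvVals line).map (pvG line)) := by
  unfold pvBuckets
  rw [pv_keys_foldl_modify, PySem.Dict.keys_empty, PySem.Set.update_nil_left]

lemma pv_row_eq (line : List Int) : equ_r_rowA line = equ_r_rowB line := by
  -- name the pieces
  have hB : equ_r_rowB line
      = (PySem.List.sorted (pvBuckets line).keys (fun c => c) false).foldl
          (fun row c => ((pvBuckets line).getD c []).foldl (fun row v => row ++ [v] ++ [c]) row)
          [] := rfl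
  set vals := pvVals line with hvals
  set g := pvG line with hg
  set ks := PySem.List.sorted (pvBuckets line).keys (fun c => c) false with hks
  -- A's sorted element list is exactly vals
  have hSA : PySem.List.sorted
      (if PySem.Set.contains (PySem.Set.ofList line) 0
        then PySem.Set.discard (PySem.Set.ofList line) 0 else PySem.Set.ofList line)
      (fun v => v) false = vals := by
    have hperm : (if PySem.Set.contains (PySem.Set.ofList line) 0
        then PySem.Set.discard (PySem.Set.ofList line) 0 else PySem.Set.ofList line).Perm
        (PySem.Set.ofList (line.filter (fun v => v ≠ 0))) := by
      apply (List.perm_ext_iff_of_nodup ?_ (PySem.Set.nodup_ofList _)).2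
      · intro x
        by_cases h0 : PySem.Set.contains (PySem.Set.ofList line) 0
        · rw [if_pos h0]
          simp [PySem.Set.mem_discard, PySem.Set.mem_ofList, List.mem_filter]
        · rw [if_neg h0]
          have h0' : (0:Int) ∉ line := by
            simpa [PySem.Set.contains_iff, PySem.Set.mem_ofList] using h0
          simp only [PySem.Set.mem_ofList, List.mem_filter, decide_eq_true_eq]
          constructor
          · intro hx; exact ⟨hx, fun h => h0' (h ▸ hx)⟩
          · exact fun h => h.1
      · by_cases h0 : PySem.Set.contains (PySem.Set.ofList line) 0
        · rw [if_pos h0]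
          exact PySem.Set.nodup_discard _ _ (PySem.Set.nodup_ofList _)
        · rw [if_neg h0]
          exact PySem.Set.nodup_ofList _
    calc PySem.List.sorted _ (fun v => v) false
        = PySem.List.sorted (PySem.Set.ofList (line.filter (fun v => v ≠ 0))) (fun v => v) false :=
          PySem.List.sorted_eq_sorted_of_perm _ _ _ (fun a b h => h) hperm
      _ = vals := by rw [hvals]; unfold pvVals; rw [pv_cnt_keys]
  -- A's row as a fold over the stably sorted pair list
  have hA : equ_r_rowA line
      = (PySem.List.sorted (vals.map (fun v => (v, (PySem.List.count line v : Int))))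
          (fun x => x.2) false).foldl (fun acc t => acc ++ [t.1, t.2]) [] := by
    simp only [equ_r_rowA]
    rw [hSA]
  -- the two pair lists
  set nline0 := vals.map (fun v => (v, (PySem.List.count line v : Int))) with hnl
  set F : Int → List (Int × Int) := fun c => (vals.filter (fun v => g v == c)).map (fun v => (v, c))
    with hF
  set LA := PySem.List.sorted nline0 (fun x => x.2) false with hLA
  set PB := ks.flatMap F with hPB
  have hnline0 : nline0 = vals.map (fun v => (v, g v)) := by
    rw [hnl]
    apply List.map_congr_left
    intro v hv
    rw [PySem.List.count_eq, hg, pv_g_count line v hv]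
  have hks_lt : ks.Pairwise (· < ·) := by
    rw [hks, pv_buckets_keys]
    exact PySem.List.sorted_ofList_pairwise_lt _
  have hks_nodup : ks.Nodup := hks_lt.imp (fun h => ne_of_lt h)
  have hcov : ∀ v ∈ vals, g v ∈ ks := by
    intro v hv
    rw [hks, PySem.List.mem_sorted, pv_buckets_keys, PySem.Set.mem_ofList]
    exact List.mem_map_of_mem hv
  have hvals_lt : vals.Pairwise (· < ·) := pv_vals_pairwise line
  have hLA_pair : LA.Pairwise pvLexS := by
    rw [hLA, hnline0]
    exact pv_sorted_snd_pairwise _ (hvals_lt.map _ (fun a b h => h))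
  have hPB_pair : PB.Pairwise pvLex := by
    rw [hPB]
    apply pv_flatMap_pairwise F ks hks_lt
    · intro c p hp
      rcases List.mem_map.1 hp with ⟨v, _, rfl⟩
      rfl
    · intro c
      exact (hvals_lt.filter _).map _ (fun a b h => h)
  have hPBeq : PB = (ks.flatMap (fun c => vals.filter (fun v => g v == c))).map
      (fun v => (v, g v)) := by
    rw [hPB, List.map_flatMap]
    apply List.flatMap_congr
    intro c _
    apply List.map_congr_left
    intro v hv
    have : g v = c := by simpa using (List.mem_filter.1 hv).2
    rw [this]
  have hperm : LA.Perm PB := by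
    apply (PySem.List.sorted_perm _ _ _).trans
    rw [hPBeq, hnline0]
    exact (pv_flatMap_filter_perm g ks vals hks_nodup hcov).map _ |>.symm
  have hLAPB : LA = PB := by
    apply List.Perm.eq_of_pairwise ?_ (hLA_pair.imp ?_) hPB_pair hperm
    · rintro ⟨a1, a2⟩ ⟨b1, b2⟩ _ _ h1 h2
      simp only [pvLex] at h1 h2
      simp only [Prod.mk.injEq]
      omega
    · rintro ⟨a1, a2⟩ ⟨b1, b2⟩ h
      simp only [pvLexS] at h
      simp only [pvLex]
      omega
  -- flatten both folds
  have hAflat : equ_r_rowA line = LA.flatMap (fun t => [t.1, t.2]) := by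
    rw [hA, PySem.List.foldl_append_eq_flatMap (fun t => [t.1, t.2]) LA []]
    simp
  have hBflat : equ_r_rowB line = PB.flatMap (fun t => [t.1, t.2]) := by
    rw [hB]
    have hinner : ∀ (c : Int) (row : List Int), ((pvBuckets line).getD c []).foldl
        (fun row v => row ++ [v] ++ [c]) row = row ++ (F c).flatMap (fun t => [t.1, t.2]) := by
      intro c row
      rw [show (fun row v => row ++ [v] ++ [c]) = (fun (row : List Int) v => row ++ [v, c]) from by
          funext row v; simp,
        PySem.List.foldl_append_eq_flatMap (fun v => [v, c]) _ row]
      congr 1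
      rw [pv_buckets_getD, hF, List.flatMap_map]
    calc (PySem.List.sorted (pvBuckets line).keys (fun c => c) false).foldl
          (fun row c => ((pvBuckets line).getD c []).foldl (fun row v => row ++ [v] ++ [c]) row) []
        = ks.foldl (fun row c => row ++ (F c).flatMap (fun t => [t.1, t.2])) [] := by
          rw [← hks]
          congr 1
          funext row c
          exact hinner c row
      _ = ks.flatMap (fun c => (F c).flatMap (fun t => [t.1, t.2])) := by
          rw [PySem.List.foldl_append_eq_flatMap]
          simp
      _ = PB.flatMap (fun t => [t.1, t.2]) := by
          rw [hPB, List.flatMap_assoc]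
  rw [hAflat, hBflat, hLAPB]

theorem equ_r_spec : Claim_equal_equ_r := by
  intro arr _ _
  unfold Spec_equ_r equ_r equ_r_alt
  simp only [PySem.List.foldl_append_singleton_eq_map, List.nil_append]
  rw [show arr.map equ_r_rowA = arr.map equ_r_rowB from
    List.map_congr_left fun l _ => pv_row_eq l]
  cases h : PySem.List.max? ((arr.map equ_r_rowB).map (fun r => (r.length : Int))) (fun x => x) with
  | none => rfl
  | some w =>
    apply List.map_congr_left
    intro row _
    dsimp only
    by_cases hlen : 100 < (row ++ PySem.List.pyRepeat [0] (w - (row.length : Int))).length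
    · rw [if_pos hlen]
    · rw [if_neg hlen, PySem.List.slice_to _ (by norm_num)]
      exact (List.take_of_length_le (by omega)).symm
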